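-- pv_equiv track=rewrite | github.com/dylanmaov-star/DylanV.py | Ejercicios/Ejercicio3.py | calcular_datos
-- ===== SOURCE A (Python) =====
-- def calcular_datos(n):
--     factorial = 1
--     pares, impares = 0, 0
--     suma_pares, suma_impares = 0, 0
--
--     for i in range(1, n+1):
--         factorial *= i
--         if i % 2 == 0:
--             pares += 1
--             suma_pares += i
--         else:
--             impares += 1
--             suma_impares += i
--
--     return factorial, pares, impares, suma_pares, suma_impares
-- ===== SOURCE B (Python) =====
-- def calcular_datos(n):
--     factorial = 1
--     for i in range(1, n + 1):
--         factorial *= i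
--     if n < 1:
--         return factorial, 0, 0, 0, 0
--     k = n // 2
--     impares = (n + 1) // 2
--     suma_pares = k * (k + 1)
--     suma_impares = n * (n + 1) // 2 - suma_pares
--     return factorial, k, impares, suma_pares, suma_impares
-- ===== Notes on version B (the rewrite author's own statement) =====
-- stated objective: faster
-- what changed: B keeps only the factorial product loop and replaces the even/odd counting and summing inside the loop by closed-form arithmetic (k = n//2, counts and Gauss sums), guarded for n < 1.
import Mathlib
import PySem

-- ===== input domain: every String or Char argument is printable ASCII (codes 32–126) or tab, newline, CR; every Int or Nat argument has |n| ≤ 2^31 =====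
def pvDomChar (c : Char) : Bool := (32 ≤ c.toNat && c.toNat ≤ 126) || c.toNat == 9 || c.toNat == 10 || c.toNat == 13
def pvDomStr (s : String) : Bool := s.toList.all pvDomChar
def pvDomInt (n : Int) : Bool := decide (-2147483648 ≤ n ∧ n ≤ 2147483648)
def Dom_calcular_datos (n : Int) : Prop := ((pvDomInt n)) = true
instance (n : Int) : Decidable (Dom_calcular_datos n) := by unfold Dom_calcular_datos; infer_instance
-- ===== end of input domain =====

-- B replaces A's five in-loop accumulators by a single factorial product loop plus
-- closed-form arithmetic for the even/odd counts and sums (constant-factor faster).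

-- ===== PORT A =====
-- one loop iteration of A: (factorial, pares, impares, suma_pares, suma_impares)
def calcStepA (st : Int × Int × Int × Int × Int) (i : Int) : Int × Int × Int × Int × Int :=
  let f := st.1 * i
  if PySem.Int.mod i 2 = 0 then
    (f, st.2.1 + 1, st.2.2.1, st.2.2.2.1 + i, st.2.2.2.2)
  else
    (f, st.2.1, st.2.2.1 + 1, st.2.2.2.1, st.2.2.2.2 + i)

def calcular_datos (n : Int) : Int × Int × Int × Int × Int :=
  (PySem.List.pyRange 1 (n + 1) 1).foldl calcStepA (1, 0, 0, 0, 0)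

-- ===== PORT B =====
def calcular_datos_alt (n : Int) : Int × Int × Int × Int × Int :=
  let factorial := (PySem.List.pyRange 1 (n + 1) 1).foldl (· * ·) 1
  if n < 1 then (factorial, 0, 0, 0, 0)
  else
    let k := PySem.Int.floordiv n 2
    let impares := PySem.Int.floordiv (n + 1) 2
    let suma_pares := k * (k + 1)
    let suma_impares := PySem.Int.floordiv (n * (n + 1)) 2 - suma_pares
    (factorial, k, impares, suma_pares, suma_impares)

-- ===== PRECONDITION & SPEC =====
def Spec_calcular_datos (n : Int) (out : Int × Int × Int × Int × Int) : Prop := out = calcular_datos_alt n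
instance (n : Int) (out : Int × Int × Int × Int × Int) : Decidable (Spec_calcular_datos n out) := by unfold Spec_calcular_datos; infer_instance

-- ===== CLAIM (what is proved, stated in full; the proofs are below) =====
def Claim_equal_calcular_datos : Prop := ∀ (n : Int), Dom_calcular_datos n → Spec_calcular_datos n (calcular_datos n)

-- ===== LEMMAS AND PROOFS =====

-- loop invariant: A's fold over 1..m computes B's factorial fold in its first slot
-- and the closed forms in the other four
lemma calc_loop_eq (m : Nat) :
    (PySem.List.pyRange 1 ((m : Int) + 1) 1).foldl calcStepA (1, 0, 0, 0, 0) =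
      ((PySem.List.pyRange 1 ((m : Int) + 1) 1).foldl (· * ·) 1,
        ((m / 2 : Nat) : Int), (((m + 1) / 2 : Nat) : Int),
        ((m / 2 : Nat) : Int) * (((m / 2 : Nat) : Int) + 1),
        (((m + 1) / 2 : Nat) : Int) * (((m + 1) / 2 : Nat) : Int)) := by
  induction m with
  | zero => decide
  | succ m ih =>
    have hr : PySem.List.pyRange 1 ((m : Int) + 1 + 1) 1 =
        PySem.List.pyRange 1 ((m : Int) + 1) 1 ++ [(m : Int) + 1] :=
      PySem.List.pyRange_one_succ_right (by omega)
    have hcast : ((m + 1 : Nat) : Int) = (m : Int) + 1 := by push_cast; ring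
    rw [hcast, hr, List.foldl_append, List.foldl_append, ih]
    have hmod : PySem.Int.mod ((m : Int) + 1) 2 = (((m + 1) % 2 : Nat) : Int) := by
      exact_mod_cast PySem.Int.mod_natCast (m + 1) 2
    rcases Nat.even_or_odd m with he | ho
    · -- m even, so i = m+1 is odd
      obtain ⟨j, hj⟩ := he
      have h2 : PySem.Int.mod ((m : Int) + 1) 2 ≠ 0 := by
        rw [hmod]; omega
      simp only [List.foldl, calcStepA, if_neg h2]
      have e1 : (m + 1) / 2 = m / 2 := by omega
      have e2 : (m + 1 + 1) / 2 = (m + 1) / 2 + 1 := by omega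
      have e3 : (m + 1) / 2 = j := by omega
      have e4 : m / 2 = j := by omega
      simp only [e1, e2, e4]
      refine Prod.ext rfl (Prod.ext rfl (Prod.ext (by push_cast; ring) (Prod.ext rfl ?_)))
      push_cast; subst hj; push_cast [e3]; ring
    · -- m odd, so i = m+1 is even
      obtain ⟨j, hj⟩ := ho
      have h2 : PySem.Int.mod ((m : Int) + 1) 2 = 0 := by
        rw [hmod]; omega
      simp only [List.foldl, calcStepA, if_pos h2]
      have e1 : (m + 1) / 2 = m / 2 + 1 := by omega
      have e2 : (m + 1 + 1) / 2 = (m + 1) / 2 := by omega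
      have e4 : m / 2 = j := by omega
      simp only [e1, e2, e4]
      refine Prod.ext rfl (Prod.ext (by push_cast; ring) (Prod.ext rfl (Prod.ext ?_ rfl)))
      push_cast; subst hj; push_cast [e4]; ring

-- ===== VERDICT (by name: the statement is the Claim_ definition above) =====
theorem calcular_datos_spec : Claim_equal_calcular_datos := by
  intro n _
  unfold Spec_calcular_datos calcular_datos calcular_datos_alt
  by_cases hn : n < 1
  · -- empty range: both sides are (1,0,0,0,0)
    have : PySem.List.pyRange 1 (n + 1) 1 = [] := by
      rw [PySem.List.pyRange_one]
      have h0 : (n + 1 - 1).toNat = 0 := by omega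
      rw [h0]; rfl
    simp [this, hn]
  · have hm : n = ((n.toNat : Nat) : Int) := by omega
    set m := n.toNat with hmdef
    have h1 : 1 ≤ m := by omega
    rw [if_neg hn, hm]
    rw [calc_loop_eq m]
    have hf1 : PySem.Int.floordiv ((m : Int)) 2 = ((m / 2 : Nat) : Int) := by
      exact_mod_cast PySem.Int.floordiv_natCast m 2
    have hf2 : PySem.Int.floordiv ((m : Int) + 1) 2 = (((m + 1) / 2 : Nat) : Int) := by
      have := PySem.Int.floordiv_natCast (m + 1) 2
      push_cast at this ⊢; exact this
    have hf3 : PySem.Int.floordiv ((m : Int) * ((m : Int) + 1)) 2 =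
        (((m * (m + 1)) / 2 : Nat) : Int) := by
      have := PySem.Int.floordiv_natCast (m * (m + 1)) 2
      push_cast at this ⊢; exact this
    simp only [hf1, hf2, hf3]
    refine Prod.ext rfl (Prod.ext rfl (Prod.ext rfl (Prod.ext rfl ?_)))
    dsimp only
    -- m(m+1)/2 - (m/2)(m/2+1) = ((m+1)/2)^2, by parity of m
    rcases Nat.even_or_odd m with ⟨j, hj⟩ | ⟨j, hj⟩
    · have hprod : (j + j) * (j + j + 1) = (j * (j + j + 1)) * 2 := by ring
      have e1 : (j + j) / 2 = j := by omega
      have e2 : (j + j + 1) / 2 = j := by omega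
      have e3 : (j + j) * (j + j + 1) / 2 = j * (j + j + 1) := by rw [hprod]; omega
      simp only [hj, e1, e2, e3]; push_cast; ring
    · have hprod : (2 * j + 1) * (2 * j + 1 + 1) = ((2 * j + 1) * (j + 1)) * 2 := by ring
      have e1 : (2 * j + 1) / 2 = j := by omega
      have e2 : (2 * j + 1 + 1) / 2 = j + 1 := by omega
      have e3 : (2 * j + 1) * (2 * j + 1 + 1) / 2 = (2 * j + 1) * (j + 1) := by rw [hprod]; omega
      simp only [hj, e1, e2, e3]; push_cast; ring
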